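-- pv_equiv track=rewrite | github.com/KyleKing/repo-dashboard | src/repo_dashboard/github_ops.py | _get_checks_status
-- ===== SOURCE A (Python) =====
-- def _get_checks_status(rollup: list | None) -> str | None:
--     if not rollup:
--         return None
--
--     states = [check.get("conclusion") or check.get("state", "") for check in rollup]
--     if not states:
--         return None
--
--     if all(s in ("SUCCESS", "COMPLETED") for s in states):
--         return "passing"
--     if any(s in ("FAILURE", "ERROR") for s in states):
--         return "failing"
--     if any(s in ("PENDING", "IN_PROGRESS", "QUEUED") for s in states):
--         return "pending"
--     return "unknown"
-- ===== SOURCE B (Python) =====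
-- _VERDICTS = ("passing", "unknown", "pending", "failing")
--
-- _RANK = {
--     "SUCCESS": 0, "COMPLETED": 0,
--     "FAILURE": 3, "ERROR": 3,
--     "PENDING": 2, "IN_PROGRESS": 2, "QUEUED": 2,
-- }
--
--
-- def _severity(check):
--     s = check.get("conclusion") or check.get("state", "")
--     return _RANK.get(s, 1)
--
--
-- def _get_checks_status(rollup):
--     if not rollup:
--         return None
--     return _VERDICTS[max(_severity(check) for check in rollup)]
-- ===== Notes on version B (the rewrite author's own statement) =====
-- stated objective: alternative
-- what changed: Replaces the intermediate states list and the staged all/any membership scans with a severity encoding: each check is mapped to a numeric rank (success 0 < unknown 1 < pending 2 < failure 3) via a lookup table, the ranks are reduced with max, and the verdict is a tuple lookup by the maximum rank.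
import Mathlib
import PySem

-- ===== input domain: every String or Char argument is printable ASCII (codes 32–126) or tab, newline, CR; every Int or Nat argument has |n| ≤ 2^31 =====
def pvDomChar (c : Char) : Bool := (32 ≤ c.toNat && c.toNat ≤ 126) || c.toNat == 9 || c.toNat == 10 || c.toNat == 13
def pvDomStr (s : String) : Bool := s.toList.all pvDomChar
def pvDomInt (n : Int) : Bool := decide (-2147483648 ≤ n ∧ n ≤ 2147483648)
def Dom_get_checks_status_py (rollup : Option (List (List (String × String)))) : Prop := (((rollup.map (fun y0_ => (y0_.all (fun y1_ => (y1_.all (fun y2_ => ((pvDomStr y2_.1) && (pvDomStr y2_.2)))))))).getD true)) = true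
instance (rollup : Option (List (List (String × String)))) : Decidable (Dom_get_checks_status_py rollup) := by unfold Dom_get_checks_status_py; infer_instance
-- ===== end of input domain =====

-- B replaces the staged all/any scans with a numeric severity rank per check, a max-reduction and a table lookup; objective: alternative.


-- shared helper: check.get("conclusion") or check.get("state", "")  (dict.get = first matching key; 'or' falls through on None and "")
def pvCheckState (check : List (String × String)) : String :=
  match (check.find? (fun p => p.1 == "conclusion")).map (·.2) with
  | some v => if v = "" then ((check.find? (fun p => p.1 == "state")).map (·.2)).getD "" else v
  | none => ((check.find? (fun p => p.1 == "state")).map (·.2)).getD ""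

-- ===== PORT A =====
def get_checks_status_py (rollup : Option (List (List (String × String)))) : Option String :=
  match rollup with
  | none => none
  | some l =>
    if l = [] then none
    else
      let states := l.map pvCheckState
      if states = [] then none
      else if states.all (fun s => s == "SUCCESS" || s == "COMPLETED") then some "passing"
      else if states.any (fun s => s == "FAILURE" || s == "ERROR") then some "failing"
      else if states.any (fun s => s == "PENDING" || s == "IN_PROGRESS" || s == "QUEUED") then some "pending"
      else some "unknown"

-- ===== PORT B =====
-- _RANK.get(s, 1): severity rank of one state string
def pvRank (s : String) : Nat :=
  (PySem.Dict.ofList [("SUCCESS", 0), ("COMPLETED", 0), ("FAILURE", 3), ("ERROR", 3),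
                      ("PENDING", 2), ("IN_PROGRESS", 2), ("QUEUED", 2)]).getD s 1

-- _severity(check)
def pvSeverity (check : List (String × String)) : Nat := pvRank (pvCheckState check)

-- _VERDICTS[m]
def pvVerdict (n : Nat) : String :=
  match n with | 0 => "passing" | 1 => "unknown" | 2 => "pending" | _ => "failing"

def get_checks_status_py_alt (rollup : Option (List (List (String × String)))) : Option String :=
  match rollup with
  | none => none
  | some [] => none
  | some (h :: t) =>
      -- max(generator): first element as the initial value, then pairwise max
      some (pvVerdict (t.foldl (fun m c => max m (pvSeverity c)) (pvSeverity h)))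

-- ===== PRECONDITION & SPEC =====
def Spec_get_checks_status_py (rollup : Option (List (List (String × String)))) (out : Option String) : Prop := out = get_checks_status_py_alt rollup
instance (rollup : Option (List (List (String × String)))) (out : Option String) : Decidable (Spec_get_checks_status_py rollup out) := by unfold Spec_get_checks_status_py; infer_instance

-- ===== CLAIM (what is proved, stated in full; the proofs are below) =====
def Claim_equal_get_checks_status_py : Prop := ∀ (rollup : Option (List (List (String × String)))), Dom_get_checks_status_py rollup → Spec_get_checks_status_py rollup (get_checks_status_py rollup)

-- ===== LEMMAS AND PROOFS =====

-- the rank table, read back as an if-chain over the state string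
theorem pvRank_char (s : String) :
    pvRank s = if s = "SUCCESS" ∨ s = "COMPLETED" then 0
      else if s = "FAILURE" ∨ s = "ERROR" then 3
      else if s = "PENDING" ∨ s = "IN_PROGRESS" ∨ s = "QUEUED" then 2
      else 1 := by
  have h : pvRank s = (PySem.Dict.mk [("SUCCESS", 0), ("COMPLETED", 0), ("FAILURE", 3), ("ERROR", 3),
                      ("PENDING", 2), ("IN_PROGRESS", 2), ("QUEUED", 2)]).getD s 1 := rfl
  rw [h]
  split_ifs with h1 h2 h3
  · rcases h1 with e | e <;> subst e <;> rfl
  · rcases h2 with e | e <;> subst e <;> rfl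
  · rcases h3 with e | e | e <;> subst e <;> rfl
  · have hn : List.find? (fun p => p.1 == s)
        [("SUCCESS", (0:Nat)), ("COMPLETED", 0), ("FAILURE", 3), ("ERROR", 3),
         ("PENDING", 2), ("IN_PROGRESS", 2), ("QUEUED", 2)] = none := by
      simp only [List.find?_eq_none, List.mem_cons, List.not_mem_nil, or_false]
      rintro a (rfl | rfl | rfl | rfl | rfl | rfl | rfl) <;> simp <;> intro e <;> simp_all
    simp [PySem.Dict.getD, PySem.Dict.get?, hn]

theorem pv_sev_le (c : List (String × String)) : pvSeverity c ≤ 3 := by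
  unfold pvSeverity; rw [pvRank_char]; split_ifs <;> omega

theorem pv_sev0 (c : List (String × String)) :
    (pvSeverity c = 0) ↔ (pvCheckState c == "SUCCESS" || pvCheckState c == "COMPLETED") = true := by
  unfold pvSeverity; rw [pvRank_char]
  split_ifs with h1 h2 h3
  · simp_all
  · rcases h2 with e | e <;> simp [e]
  · rcases h3 with e | e | e <;> simp [e]
  · simp_all

theorem pv_sev3 (c : List (String × String)) :
    (pvSeverity c = 3) ↔ (pvCheckState c == "FAILURE" || pvCheckState c == "ERROR") = true := by
  unfold pvSeverity; rw [pvRank_char]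
  split_ifs with h1 h2 h3
  · rcases h1 with e | e <;> simp [e]
  · simp_all
  · rcases h3 with e | e | e <;> simp [e]
  · simp_all

theorem pv_sev2 (c : List (String × String)) :
    (pvSeverity c = 2) ↔ (pvCheckState c == "PENDING" || pvCheckState c == "IN_PROGRESS" || pvCheckState c == "QUEUED") = true := by
  unfold pvSeverity; rw [pvRank_char]
  split_ifs with h1 h2 h3
  · rcases h1 with e | e <;> simp [e]
  · rcases h2 with e | e <;> simp [e]
  · simp; tauto
  · simp_all

-- the max-fold with any initial value equals max of the init and the zero-init fold
theorem pv_fold_comm (t : List (List (String × String))) (a : Nat) :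
    t.foldl (fun m c => max m (pvSeverity c)) a
      = max a (t.foldl (fun m c => max m (pvSeverity c)) 0) := by
  induction t generalizing a with
  | nil => simp
  | cons h s ih =>
    simp only [List.foldl_cons]
    rw [ih (max a (pvSeverity h)), ih (max 0 (pvSeverity h))]
    omega

-- characterisation of the zero-init max-fold by the any-predicates on ranks
theorem pv_fold_char (t : List (List (String × String))) :
    t.foldl (fun m c => max m (pvSeverity c)) 0
      = if t.any (fun c => pvSeverity c = 3) then 3
        else if t.any (fun c => pvSeverity c = 2) then 2
        else if t.any (fun c => pvSeverity c = 1) then 1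
        else 0 := by
  induction t with
  | nil => simp
  | cons h s ih =>
    simp only [List.foldl_cons, List.any_cons]
    rw [pv_fold_comm, ih]
    have hcase : pvSeverity h = 0 ∨ pvSeverity h = 1 ∨ pvSeverity h = 2 ∨ pvSeverity h = 3 := by
      have := pv_sev_le h; omega
    rcases hcase with hh | hh | hh | hh <;> simp [hh] <;> split_ifs <;> omega

-- all-zero equals no element of positive rank
theorem pv_all0 (t : List (List (String × String))) :
    t.all (fun c => decide (pvSeverity c = 0))
      = !(t.any (fun c => decide (pvSeverity c = 1)) || t.any (fun c => decide (pvSeverity c = 2)) || t.any (fun c => decide (pvSeverity c = 3))) := by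
  induction t with
  | nil => simp
  | cons h s ih =>
    have hle := pv_sev_le h
    have hcase : pvSeverity h = 0 ∨ pvSeverity h = 1 ∨ pvSeverity h = 2 ∨ pvSeverity h = 3 := by omega
    simp only [List.all_cons, List.any_cons, ih]
    rcases hcase with hh | hh | hh | hh <;> simp [hh]

-- ===== VERDICT (by name: the statement is the Claim_ definition above) =====
theorem get_checks_status_py_spec : Claim_equal_get_checks_status_py := by
  intro rollup _
  match rollup with
  | none => rfl
  | some [] => rfl
  | some (h :: t) =>
    simp only [Spec_get_checks_status_py, get_checks_status_py, get_checks_status_py_alt]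
    rw [pv_fold_comm, pv_fold_char]
    simp only [List.map_cons, List.all_cons, List.any_cons,
      List.all_map, List.any_map, Function.comp_def]
    -- rewrite A's string predicates into rank predicates
    have e0 : ∀ c : List (String × String),
        (pvCheckState c == "SUCCESS" || pvCheckState c == "COMPLETED") = decide (pvSeverity c = 0) := by
      intro c
      rcases Bool.eq_false_or_eq_true (pvCheckState c == "SUCCESS" || pvCheckState c == "COMPLETED") with hb | hb <;>
        simp_all [pv_sev0 c]
    have e3 : ∀ c : List (String × String),
        (pvCheckState c == "FAILURE" || pvCheckState c == "ERROR") = decide (pvSeverity c = 3) := by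
      intro c
      rcases Bool.eq_false_or_eq_true (pvCheckState c == "FAILURE" || pvCheckState c == "ERROR") with hb | hb <;>
        simp_all [pv_sev3 c]
    have e2 : ∀ c : List (String × String),
        (pvCheckState c == "PENDING" || pvCheckState c == "IN_PROGRESS" || pvCheckState c == "QUEUED") = decide (pvSeverity c = 2) := by
      intro c
      rcases Bool.eq_false_or_eq_true (pvCheckState c == "PENDING" || pvCheckState c == "IN_PROGRESS" || pvCheckState c == "QUEUED") with hb | hb <;>
        simp_all [pv_sev2 c]
    simp only [e0, e3, e2]
    rw [pv_all0]
    have hcase : pvSeverity h = 0 ∨ pvSeverity h = 1 ∨ pvSeverity h = 2 ∨ pvSeverity h = 3 := by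
      have := pv_sev_le h; omega
    by_cases a3 : t.any (fun c => decide (pvSeverity c = 3)) <;>
    by_cases a2 : t.any (fun c => decide (pvSeverity c = 2)) <;>
    by_cases a1 : t.any (fun c => decide (pvSeverity c = 1)) <;>
      rcases hcase with hh | hh | hh | hh <;>
      simp [a1, a2, a3, hh, pvVerdict]
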